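-- pv_equiv track=rewrite | github.com/krolikladoshka/solveit | yandex/lektionfunf.py | prefzeroes
-- ===== SOURCE A (Python) =====
-- def prefzeroes(seq):
--     ps = [0] * (len(seq) + 1)
--
--     for i in range(1, len(seq) + 1):
--         if seq[i - 1] == 0:
--             ps[i] = ps[i - 1] + 1
--         else:
--             ps[i] = ps[i - 1]
--     return ps
-- ===== SOURCE B (Python) =====
-- def prefzeroes(seq):
--     zeros = [i for i, x in enumerate(seq) if x == 0]
--     result = []
--     for k in range(len(seq) + 1):
--         lo, hi = 0, len(zeros)
--         while lo < hi:
--             mid = (lo + hi) // 2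
--             if zeros[mid] < k:
--                 lo = mid + 1
--             else:
--                 hi = mid
--         result.append(lo)
--     return result
-- ===== Notes on version B (the rewrite author's own statement) =====
-- stated objective: alternative
-- what changed: Replaces A's single-pass running-sum recurrence with an index structure: B collects the positions of zeros once, then answers each prefix k independently by binary search (number of zero positions < k), so no running counter is maintained.
import Mathlib
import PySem

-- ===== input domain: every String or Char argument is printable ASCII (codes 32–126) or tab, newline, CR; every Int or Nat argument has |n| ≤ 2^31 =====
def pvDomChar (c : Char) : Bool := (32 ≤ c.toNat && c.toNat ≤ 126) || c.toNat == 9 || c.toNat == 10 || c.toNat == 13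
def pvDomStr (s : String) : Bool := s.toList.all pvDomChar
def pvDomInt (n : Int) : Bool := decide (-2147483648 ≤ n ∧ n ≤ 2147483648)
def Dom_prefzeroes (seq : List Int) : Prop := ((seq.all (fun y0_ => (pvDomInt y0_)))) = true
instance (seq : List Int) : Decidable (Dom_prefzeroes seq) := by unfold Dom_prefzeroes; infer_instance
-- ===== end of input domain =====

-- B replaces A's running-sum recurrence by an index structure: the positions of
-- zeros are collected once, and each prefix k is answered by binary search.

-- ===== PORT A =====
-- ps = [0]*(len(seq)+1); for i in range(1, len(seq)+1): ps[i] = ps[i-1] (+1 if seq[i-1]==0)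
-- indices i-1 and i are always in range, so pyGetD's default and pySet?'s getD fallback are never used
def prefzeroes (seq : List Int) : List Int :=
  (PySem.List.pyRange 1 ((seq.length : Int) + 1) 1).foldl
    (fun ps i =>
      let v : Int :=
        if PySem.List.pyGetD seq (i - 1) 0 = 0
        then PySem.List.pyGetD ps (i - 1) 0 + 1
        else PySem.List.pyGetD ps (i - 1) 0
      (PySem.List.pySet? ps i v).getD ps)
    (List.replicate (seq.length + 1) 0)

-- ===== PORT B =====
-- the while loop 'lo, hi = 0, len(zeros); while lo < hi: …' (zeros[mid] is always in range)
def pvBsearch (zs : List Int) (k : Int) (lo hi : Nat) : Nat :=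
  if lo < hi then
    let mid := (lo + hi) / 2
    if PySem.List.pyGetD zs (mid : Int) 0 < k then pvBsearch zs k (mid + 1) hi
    else pvBsearch zs k lo mid
  else lo
termination_by hi - lo
decreasing_by all_goals omega

-- zeros = [i for i, x in enumerate(seq) if x == 0]; for k in range(len(seq)+1): result.append(lo)
def prefzeroes_alt (seq : List Int) : List Int :=
  let zeros : List Int := ((PySem.List.enumerate seq 0).filter (fun p => p.2 == 0)).map (·.1)
  (PySem.List.pyRange 0 ((seq.length : Int) + 1) 1).foldl
    (fun result k => result ++ [(pvBsearch zeros k 0 zeros.length : Int)]) []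

-- ===== PRECONDITION & SPEC =====
def Spec_prefzeroes (seq : List Int) (out : List Int) : Prop := out = prefzeroes_alt seq
instance (seq : List Int) (out : List Int) : Decidable (Spec_prefzeroes seq out) := by unfold Spec_prefzeroes; infer_instance

-- ===== CLAIM =====
def Claim_equal_prefzeroes : Prop := ∀ (seq : List Int), Dom_prefzeroes seq → Spec_prefzeroes seq (prefzeroes seq)

-- ===== LEMMAS AND PROOFS =====

-- loop invariant of A: after processing indices 1..j, cell k holds the prefix count for k ≤ j, 0 beyond
theorem loopA_inv (l : List Int) (j : Nat) (hj : j ≤ l.length) :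
    (PySem.List.pyRange ((j : Int) + 1) ((l.length : Int) + 1) 1).foldl
      (fun ps i =>
        let v : Int :=
          if PySem.List.pyGetD l (i - 1) 0 = 0
          then PySem.List.pyGetD ps (i - 1) 0 + 1
          else PySem.List.pyGetD ps (i - 1) 0
        (PySem.List.pySet? ps i v).getD ps)
      ((List.range (l.length + 1)).map
        (fun k => if k ≤ j then ((l.take k).map (fun x => if x = 0 then (1 : Int) else 0)).sum else 0))
    = (List.range (l.length + 1)).map
        (fun k => ((l.take k).map (fun x => if x = 0 then (1 : Int) else 0)).sum) := by
  induction h : l.length - j generalizing j with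
  | zero =>
      have hje : j = l.length := by omega
      subst hje
      rw [PySem.List.pyRange_one_eq_nil (by omega)]
      simp only [List.foldl_nil]
      apply List.map_congr_left
      intro k hk
      rw [List.mem_range] at hk
      simp [show k ≤ l.length from by omega]
  | succ m ih =>
      have hjn : j < l.length := by omega
      rw [PySem.List.pyRange_one_cons (by exact_mod_cast by omega)]
      rw [List.foldl_cons]
      set ps : List Int := (List.range (l.length + 1)).map
          (fun k => if k ≤ j then ((l.take k).map (fun x => if x = 0 then (1 : Int) else 0)).sum else 0) with hps
      have hstep :
          (let v : Int :=
              if PySem.List.pyGetD l ((j : Int) + 1 - 1) 0 = 0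
              then PySem.List.pyGetD ps ((j : Int) + 1 - 1) 0 + 1
              else PySem.List.pyGetD ps ((j : Int) + 1 - 1) 0;
            (PySem.List.pySet? ps ((j : Int) + 1) v).getD ps)
          = (List.range (l.length + 1)).map
              (fun k => if k ≤ j + 1 then ((l.take k).map (fun x => if x = 0 then (1 : Int) else 0)).sum else 0) := by
        have hlen : ps.length = l.length + 1 := by simp [hps]
        have hget : PySem.List.pyGetD ps ((j : Int) + 1 - 1) 0
            = ((l.take j).map (fun x => if x = 0 then (1 : Int) else 0)).sum := by
          rw [show (j : Int) + 1 - 1 = ((j : Nat) : Int) by ring, PySem.List.pyGetD_natCast, hps,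
            List.getD_eq_getElem _ 0 (by simp; omega)]
          simp
        have hgetl : PySem.List.pyGetD l ((j : Int) + 1 - 1) 0 = l[j] := by
          rw [show (j : Int) + 1 - 1 = ((j : Nat) : Int) by ring, PySem.List.pyGetD_natCast,
            List.getD_eq_getElem l 0 hjn]
        have hset : ∀ v : Int, (PySem.List.pySet? ps ((j : Int) + 1) v).getD ps = ps.set (j + 1) v := by
          intro v
          rw [show (j : Int) + 1 = ((j + 1 : Nat) : Int) by push_cast; ring]
          show PySem.List.pySetD ps ((j + 1 : Nat) : Int) v = ps.set (j + 1) v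
          rw [PySem.List.pySetD_natCast]
        have hsucc : ((l.take (j + 1)).map (fun x => if x = 0 then (1 : Int) else 0)).sum
            = ((l.take j).map (fun x => if x = 0 then (1 : Int) else 0)).sum
              + (if l[j] = 0 then (1 : Int) else 0) := by
          rw [List.take_add_one, List.getElem?_eq_getElem hjn]
          simp only [Option.toList_some, List.map_append, List.sum_append,
            List.map_cons, List.map_nil, List.sum_cons, List.sum_nil, add_zero]
        simp only [hget, hgetl, hset]
        apply List.ext_getElem (by simp [hps])
        intro k hk1 hk2
        simp only [List.length_set, hlen] at hk1
        rw [List.getElem_set]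
        rw [List.getElem_of_eq hps]
        simp only [List.getElem_map, List.getElem_range, List.length_map, List.length_range] at hk2 ⊢
        by_cases hk : j + 1 = k
        · subst hk
          rw [if_pos rfl, if_pos (Nat.le_refl (j + 1)), hsucc]
          split_ifs <;> simp
        · rw [if_neg hk]
          split_ifs <;> first | rfl | omega
      rw [hstep, show (j : Int) + 1 + 1 = ((j + 1 : Nat) : Int) + 1 by push_cast; ring]
      exact ih (j + 1) (by omega) (by omega)

-- a 0/1 indicator sum is a count
theorem sum_ind_eq_count (l : List Int) :
    (l.map (fun x => if x = 0 then (1 : Int) else 0)).sum = (l.count 0 : Int) := by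
  induction l with
  | nil => simp
  | cons x xs ih =>
      simp only [List.map_cons, List.sum_cons, ih, List.count_cons]
      by_cases h : x = 0
      · simp only [h, beq_self_eq_true, if_true]
        push_cast; ring
      · simp only [beq_iff_eq, if_neg h]
        push_cast; ring

-- if a predicate holds exactly on the first m positions of a list, it counts to m
theorem countP_eq_of_prefix {α : Type} (p : α → Bool) (l : List α) (m : Nat) (hm : m ≤ l.length)
    (h : ∀ i (hi : i < l.length), p l[i] = true ↔ i < m) : l.countP p = m := by
  induction l generalizing m with
  | nil =>
      have : m = 0 := by simpa using hm
      subst this; simp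
  | cons x xs ih =>
      have h0 := h 0 (by simp)
      simp only [List.getElem_cons_zero] at h0
      rcases m with _ | m'
      · have hx : p x = false := by
          cases hpx : p x
          · rfl
          · exact absurd (h0.mp hpx) (by omega)
        rw [List.countP_cons, hx]
        have ht := ih 0 (Nat.zero_le _) (fun i hi => by
          have := h (i + 1) (by simpa using Nat.succ_lt_succ hi)
          simpa using this)
        rw [ht]
        simp
      · have hx : p x = true := h0.mpr (Nat.succ_pos _)
        rw [List.countP_cons, hx]
        have ht := ih m' (by simpa using hm) (fun i hi => by
          have := h (i + 1) (by simpa using Nat.succ_lt_succ hi)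
          simpa [Nat.succ_lt_succ_iff] using this)
        rw [ht]
        simp

-- binary-search correctness on a strictly increasing list:
-- with everything below lo known < k and everything from hi known ≥ k, the loop returns countP (< k)
theorem bsearch_countP (zs : List Int) (k : Int) (hs : zs.Pairwise (· < ·))
    (n lo hi : Nat) (hfuel : hi - lo ≤ n) (hhi : hi ≤ zs.length) (hlh : lo ≤ hi)
    (hlo : ∀ i (h : i < zs.length), i < lo → zs[i] < k)
    (hhi2 : ∀ i (h : i < zs.length), hi ≤ i → ¬ zs[i] < k) :
    pvBsearch zs k lo hi = zs.countP (fun z => z < k) := by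
  have hmono : ∀ i j (hi : i < zs.length) (hj : j < zs.length), i < j → zs[i] < zs[j] :=
    fun i j hi' hj' hij => List.pairwise_iff_getElem.mp hs i j hi' hj' hij
  induction n generalizing lo hi with
  | zero =>
      have he : lo = hi := by omega
      subst he
      rw [pvBsearch, if_neg (by omega)]
      refine (countP_eq_of_prefix _ zs lo (by omega) ?_).symm
      intro i hi
      constructor
      · intro hp
        by_contra hge
        exact absurd (by simpa using hp) (hhi2 i hi (by omega))
      · intro hil
        simpa using hlo i hi hil
  | succ n ih =>
      by_cases hcmp : lo < hi
      · rw [pvBsearch, if_pos hcmp]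
        have hmid1 : lo ≤ (lo + hi) / 2 := by omega
        have hmid2 : (lo + hi) / 2 < hi := by omega
        have hmlt : (lo + hi) / 2 < zs.length := by omega
        have hget : PySem.List.pyGetD zs (((lo + hi) / 2 : Nat) : Int) 0 = zs[(lo + hi) / 2] := by
          rw [PySem.List.pyGetD_natCast, List.getD_eq_getElem zs 0 hmlt]
        simp only [hget]
        by_cases hc : zs[(lo + hi) / 2] < k
        · rw [if_pos hc]
          exact ih ((lo + hi) / 2 + 1) hi (by omega) hhi (by omega)
            (fun i hi' hil => by
              rcases Nat.lt_succ_iff_lt_or_eq.mp hil with h' | h'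
              · exact lt_trans (hmono i _ hi' hmlt h') hc
              · subst h'; exact hc)
            hhi2
        · rw [if_neg hc]
          exact ih lo ((lo + hi) / 2) (by omega) (by omega) hmid1 hlo
            (fun i hi' hge => by
              intro hik
              rcases Nat.eq_or_lt_of_le hge with h' | h'
              · exact hc (h' ▸ hik)
              · exact hc (lt_trans (hmono _ i hmlt hi' h') hik))
      · rw [pvBsearch, if_neg hcmp]
        have he : lo = hi := by omega
        subst he
        refine (countP_eq_of_prefix _ zs lo (by omega) ?_).symm
        intro i hi
        constructor
        · intro hp
          by_contra hge
          exact absurd (by simpa using hp) (hhi2 i hi (by omega))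
        · intro hil
          simpa using hlo i hi hil

-- the zero-position list is strictly increasing
theorem zeros_pairwise (seq : List Int) :
    (((PySem.List.enumerate seq 0).filter (fun p => p.2 == 0)).map (·.1)).Pairwise (· < ·) := by
  apply List.Pairwise.map
  · exact fun a b h => h
  · exact (PySem.List.pairwise_lt_enumerate seq 0).sublist List.filter_sublist

-- counting zero positions below k = counting zeros among the first k elements (offset-generalised)
theorem countP_zeros_eq_count_take (seq : List Int) (s : Int) (k : Nat) :
    (((PySem.List.enumerate seq s).filter (fun p => p.2 == 0)).map (·.1)).countP
        (fun z => z < s + (k : Int))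
      = (seq.take k).count 0 := by
  induction seq generalizing s k with
  | nil => simp [PySem.List.enumerate_nil]
  | cons x xs ih =>
      rw [PySem.List.enumerate_cons]
      rcases k with _ | k'
      · -- k = 0: no position of enumerate xs s' is < s
        simp only [Nat.cast_zero, add_zero, List.take_zero, List.count_nil]
        rw [List.countP_eq_length_filter, List.length_eq_zero_iff, List.filter_eq_nil_iff]
        intro z hz
        simp only [List.mem_map, List.mem_filter, List.mem_cons] at hz
        obtain ⟨p, ⟨hp, _⟩, hpz⟩ := hz
        subst hpz
        simp only [decide_eq_true_eq, not_lt]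
        rcases hp with rfl | hmem
        · exact le_refl s
        · rw [PySem.List.mem_enumerate_iff] at hmem
          obtain ⟨j, hj, rfl⟩ := hmem
          show s ≤ s + 1 + (j : Int)
          omega
      · rw [List.take_succ_cons, List.count_cons]
        by_cases hx : x = 0
        · rw [List.filter_cons_of_pos (by simp [hx]), List.map_cons, List.countP_cons]
          have hhead : decide ((s : Int) < s + ((k' + 1 : Nat) : Int)) = true := by
            simp only [decide_eq_true_eq]; push_cast; omega
          rw [hhead]
          have := ih (s + 1) k'
          rw [show s + ((k' + 1 : Nat) : Int) = (s + 1) + (k' : Int) by push_cast; ring]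
          simp only [this, hx]
          simp
        · rw [List.filter_cons_of_neg (by simp [hx])]
          have := ih (s + 1) k'
          rw [show s + ((k' + 1 : Nat) : Int) = (s + 1) + (k' : Int) by push_cast; ring]
          rw [this]
          simp [hx]

-- ===== VERDICT (by name: the statement is the Claim_ definition above) =====
theorem prefzeroes_spec : Claim_equal_prefzeroes := by
  intro seq _
  unfold Spec_prefzeroes prefzeroes prefzeroes_alt
  -- A's side: the loop computes the canonical prefix-count table
  have h0 : List.replicate (seq.length + 1) (0 : Int)
      = (List.range (seq.length + 1)).map
          (fun k => if k ≤ 0 then ((seq.take k).map (fun x => if x = 0 then (1 : Int) else 0)).sum else 0) := by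
    apply List.ext_getElem (by simp)
    intro k hk1 hk2
    simp only [List.getElem_replicate, List.getElem_map, List.getElem_range]
    split_ifs with h
    · have : k = 0 := by omega
      subst this; simp
    · rfl
  have hmain := loopA_inv seq 0 (Nat.zero_le _)
  simp only [Nat.cast_zero, zero_add] at hmain
  rw [h0, hmain]
  -- B's side: the append loop is a map over the range
  rw [PySem.List.foldl_append_singleton_eq_map]
  rw [PySem.List.pyRange_one 0 ((seq.length : Int) + 1)]
  rw [show ((seq.length : Int) + 1 - 0).toNat = seq.length + 1 by omega]
  rw [List.map_map]
  apply List.map_congr_left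
  intro k hk
  rw [List.mem_range] at hk
  simp only [Function.comp, zero_add]
  rw [sum_ind_eq_count]
  set zeros : List Int := ((PySem.List.enumerate seq 0).filter (fun p => p.2 == 0)).map (·.1) with hz
  have hbs := bsearch_countP zeros ((k : Nat) : Int) (zeros_pairwise seq)
      zeros.length 0 zeros.length (by omega) (le_refl _) (Nat.zero_le _)
      (fun i hi' h => by omega) (fun i hi' h => by omega)
  rw [hbs]
  have := countP_zeros_eq_count_take seq 0 k
  rw [show (0 : Int) + (k : Int) = (k : Int) by ring] at this
  rw [← hz] at this
  rw [this]
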